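-- pv_equiv track=rewrite | github.com/Saifeddine99/CV_Extractor | src/evaluation/evaluation_utils.py | compare_list_of_objects
-- ===== SOURCE A (Python) =====
-- def normalize_string(s):
--     if isinstance(s, str):
--         return s.lower().strip() if s else ""
--
-- def compare_list_of_objects(gt_list, pred_list):
--     matched_pred_indices = set()
--     tp = 0
--     for gt_obj in gt_list:
--         match_found = False
--         for idx, pred_obj in enumerate(pred_list):
--             if idx in matched_pred_indices:
--                 continue
--             if all(normalize_string(gt_obj.get(k, '')) == normalize_string(pred_obj.get(k, '')) for k in gt_obj):
--                 match_found = True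
--                 matched_pred_indices.add(idx)
--                 break
--         if match_found:
--             tp += 1
--     fn = len(gt_list) - tp
--     fp = len(pred_list) - tp
--     return tp, fn, fp
-- ===== SOURCE B (Python) =====
-- def normalize_string(s):
--     if isinstance(s, str):
--         return s.lower().strip() if s else ""
--
-- def compare_list_of_objects(gt_list, pred_list):
--     # memoized ordered queues of pred indices, one per normalized
--     # (sorted keys, values) gt signature; matched indices are removed lazily,
--     # so repeated signatures are resolved by a queue lookup instead of a rescan.
--     queues = {}
--     matched = set()
--     tp = 0
--     for g in gt_list:
--         ks = tuple(sorted(g))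
--         key = (ks, tuple(normalize_string(g[k]) for k in ks))
--         if key not in queues:
--             queues[key] = [i for i, p in enumerate(pred_list)
--                            if all(normalize_string(p.get(k, '')) == v
--                                   for k, v in zip(ks, key[1]))]
--         q = queues[key]
--         while q and q[0] in matched:
--             q.pop(0)
--         if q:
--             matched.add(q.pop(0))
--             tp += 1
--     return tp, len(gt_list) - tp, len(pred_list) - tp
-- ===== Notes on version B (the rewrite author's own statement) =====
-- stated objective: alternative
-- what changed: B replaces A's per-gt rescan with a matched-index skip set by memoized ordered queues of matching pred indices, one per distinct normalized (sorted keys, values) gt signature, consumed with lazy deletion of matched indices, so repeated signatures are resolved by a dictionary lookup instead of a fresh scan.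
import Mathlib
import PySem

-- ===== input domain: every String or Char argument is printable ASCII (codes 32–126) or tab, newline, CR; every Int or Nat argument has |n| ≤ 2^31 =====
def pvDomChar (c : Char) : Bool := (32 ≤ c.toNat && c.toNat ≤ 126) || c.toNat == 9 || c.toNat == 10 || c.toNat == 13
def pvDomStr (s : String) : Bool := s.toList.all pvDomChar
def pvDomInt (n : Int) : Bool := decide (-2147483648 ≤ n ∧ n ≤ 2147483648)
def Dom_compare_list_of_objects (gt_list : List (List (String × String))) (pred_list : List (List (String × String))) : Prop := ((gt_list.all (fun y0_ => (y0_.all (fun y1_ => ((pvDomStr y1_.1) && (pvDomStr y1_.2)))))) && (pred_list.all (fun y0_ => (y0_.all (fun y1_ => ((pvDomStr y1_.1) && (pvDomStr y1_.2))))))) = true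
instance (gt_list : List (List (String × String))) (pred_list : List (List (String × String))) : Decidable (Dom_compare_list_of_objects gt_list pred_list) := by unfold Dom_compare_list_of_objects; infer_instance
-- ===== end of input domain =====

-- B replaces A's per-gt rescans of pred_list by ordered queues of pred indices hashed
-- under a normalized (sorted keys, values) signature, with lazy deletion of matched indices.

-- ===== PORT A =====
-- normalize_string (inputs are always non-empty-typed strings here; '' maps to '')
def pvNorm (s : String) : String := if s == "" then "" else PySem.Str.strip (PySem.Str.lower s)

-- all(normalize_string(gt_obj.get(k, '')) == normalize_string(pred_obj.get(k, '')) for k in gt_obj)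
def pvMatchA (g p : PySem.Dict String String) : Bool :=
  g.keys.all (fun k => pvNorm (g.getD k "") == pvNorm (p.getD k ""))

-- the inner 'for idx, pred_obj in enumerate(pred_list)' loop with its 'continue' and 'break'
def pvFindA (g : PySem.Dict String String) (l : List (Int × PySem.Dict String String))
    (matched : PySem.Set Int) : Option Int :=
  match l with
  | [] => none
  | (idx, p) :: rest =>
    if PySem.Set.contains matched idx then pvFindA g rest matched
    else if pvMatchA g p then some idx
    else pvFindA g rest matched

-- body of the outer 'for gt_obj in gt_list' loop; state = (matched_pred_indices, tp)
def pvStepA (enum : List (Int × PySem.Dict String String)) (st : PySem.Set Int × Int)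
    (g : PySem.Dict String String) : PySem.Set Int × Int :=
  match pvFindA g enum st.1 with
  | some idx => (PySem.Set.add st.1 idx, st.2 + 1)
  | none => st

def compare_list_of_objects (gt_list : List (List (String × String))) (pred_list : List (List (String × String))) : Int × Int × Int :=
  let enum := PySem.List.enumerate (pred_list.map PySem.Dict.ofList)
  let st := (gt_list.map PySem.Dict.ofList).foldl (pvStepA enum) (PySem.Set.empty, 0)
  (st.2, (gt_list.length : Int) - st.2, (pred_list.length : Int) - st.2)

-- ===== PORT B =====
-- tuple(normalize_string(d.get(k, '')) for k in ks)
def pvSig (ks : List String) (d : PySem.Dict String String) : List String :=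
  ks.map (fun k => pvNorm (d.getD k ""))

-- B's state: (queues, matched, tp)
def pvStB : Type := PySem.Dict (List String × List String) (List Int) × PySem.Set Int × Int

-- body of B's 'for g in gt_list' loop
def pvStepB (preds : List (PySem.Dict String String)) (st : pvStB)
    (g : PySem.Dict String String) : pvStB :=
  let ks := PySem.List.sorted g.keys (fun k => k) false
  let key := (ks, pvSig ks g)
  let queues := if st.1.contains key then st.1
    else st.1.insert key
      (((PySem.List.enumerate preds).filter
        (fun ip => (ks.zip key.2).all (fun kv => pvNorm (ip.2.getD kv.1 "") == kv.2))).map (·.1))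
  let q := (queues.getD key []).dropWhile (fun i => PySem.Set.contains st.2.1 i)
  match q with
  | [] => (queues.insert key q, st.2.1, st.2.2)
  | i :: rest => (queues.insert key rest, PySem.Set.add st.2.1 i, st.2.2 + 1)

def compare_list_of_objects_alt (gt_list : List (List (String × String))) (pred_list : List (List (String × String))) : Int × Int × Int :=
  let preds := pred_list.map PySem.Dict.ofList
  let st := (gt_list.map PySem.Dict.ofList).foldl (pvStepB preds)
    (PySem.Dict.empty, PySem.Set.empty, 0)
  (st.2.2, (gt_list.length : Int) - st.2.2, (pred_list.length : Int) - st.2.2)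

-- ===== PRECONDITION & SPEC =====
def Spec_compare_list_of_objects (gt_list : List (List (String × String))) (pred_list : List (List (String × String))) (out : Int × Int × Int) : Prop := out = compare_list_of_objects_alt gt_list pred_list
instance (gt_list : List (List (String × String))) (pred_list : List (List (String × String))) (out : Int × Int × Int) : Decidable (Spec_compare_list_of_objects gt_list pred_list out) := by unfold Spec_compare_list_of_objects; infer_instance

-- ===== CLAIM (what is proved, stated in full; the proofs are below) =====
def Claim_equal_compare_list_of_objects : Prop := ∀ (gt_list : List (List (String × String))) (pred_list : List (List (String × String))), Dom_compare_list_of_objects gt_list pred_list → Spec_compare_list_of_objects gt_list pred_list (compare_list_of_objects gt_list pred_list)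

-- ===== LEMMAS AND PROOFS =====

-- the full queue B builds for a signature key
def pvQueue (preds : List (PySem.Dict String String)) (key : List String × List String) : List Int :=
  ((PySem.List.enumerate preds).filter
    (fun ip => (key.1.zip key.2).all (fun kv => pvNorm (ip.2.getD kv.1 "") == kv.2))).map (·.1)

-- B-vs-A state invariant: every stored queue is a suffix of the full queue whose dropped
-- prefix consists of already-matched indices
def pvInv (queues : PySem.Dict (List String × List String) (List Int))
    (preds : List (PySem.Dict String String)) (m : PySem.Set Int) : Prop :=
  ∀ key cur, queues.get? key = some cur →
    ∃ pre, pvQueue preds key = pre ++ cur ∧ ∀ i ∈ pre, PySem.Set.contains m i = true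

theorem pvContainsAddMono (s : PySem.Set Int) (x y : Int)
    (h : PySem.Set.contains s y = true) :
    PySem.Set.contains (PySem.Set.add s x) y = true := by
  simp only [PySem.Set.add, PySem.Set.contains] at *
  split <;> simp_all

theorem pvContainsAddSelf (s : PySem.Set Int) (x : Int) :
    PySem.Set.contains (PySem.Set.add s x) x = true := by
  simp only [PySem.Set.add, PySem.Set.contains]
  split <;> simp_all

theorem pvZipAllEq (ks : List String) (p g : PySem.Dict String String) :
    ((ks.zip (pvSig ks g)).all (fun kv => pvNorm (p.getD kv.1 "") == kv.2))
      = (pvSig ks p == pvSig ks g) := by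
  induction ks with
  | nil => rfl
  | cons k rest ih => simp_all [pvSig, List.all_cons, Bool.and_comm]

theorem pvMatchA_eq_sig (g p : PySem.Dict String String) :
    pvMatchA g p = (pvSig (PySem.List.sorted g.keys (fun k => k) false) p
                    == pvSig (PySem.List.sorted g.keys (fun k => k) false) g) := by
  have hperm := PySem.List.sorted_perm g.keys (fun k => k) false
  rw [Bool.eq_iff_iff]
  simp only [pvMatchA, pvSig, List.all_eq_true, beq_iff_eq, List.map_inj_left]
  constructor
  · intro h k hk
    exact (h k (hperm.mem_iff.mp hk)).symm
  · intro h k hk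
    exact (h k (hperm.mem_iff.mpr hk)).symm

theorem pvFindA_eq_find (g : PySem.Dict String String)
    (l : List (Int × PySem.Dict String String)) (m : PySem.Set Int) :
    pvFindA g l m =
      ((l.filter (fun ip => pvMatchA g ip.2)).map (·.1)).find?
        (fun i => ! PySem.Set.contains m i) := by
  induction l with
  | nil => rfl
  | cons hd tl ih =>
    obtain ⟨idx, p⟩ := hd
    by_cases hm : idx ∈ m
    · by_cases hp : pvMatchA g p <;> simp [pvFindA, hm, hp, ih, PySem.Set.contains]
    · by_cases hp : pvMatchA g p <;>
        simp [pvFindA, hm, hp, ih, PySem.Set.contains]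

theorem find_not_eq_head_dropWhile {α : Type} (q : α → Bool) (l : List α) :
    l.find? (fun x => ! q x) = (l.dropWhile q).head? := by
  induction l with
  | nil => rfl
  | cons hd tl ih =>
    by_cases h : q hd <;> simp [List.find?, List.dropWhile, h, ih]

theorem pvStep_agree (preds : List (PySem.Dict String String))
    (g : PySem.Dict String String) (queues : PySem.Dict (List String × List String) (List Int))
    (m : PySem.Set Int) (tp : Int) (hinv : pvInv queues preds m) :
    pvStepA (PySem.List.enumerate preds) (m, tp) g
        = ((pvStepB preds (queues, m, tp) g).2.1, (pvStepB preds (queues, m, tp) g).2.2)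
      ∧ pvInv (pvStepB preds (queues, m, tp) g).1 preds (pvStepB preds (queues, m, tp) g).2.1 := by
  have hperm := PySem.List.sorted_perm g.keys (fun k => k) false
  set ks := PySem.List.sorted g.keys (fun k => k) false with hks
  set key : List String × List String := (ks, pvSig ks g) with hkey
  set queues' := if queues.contains key then queues
    else queues.insert key (pvQueue preds key) with hq'
  set cur := queues'.getD key [] with hcur
  -- the stored queue for key is the full queue minus an already-matched prefix
  have hsuffix : ∃ pre, pvQueue preds key = pre ++ cur ∧
      ∀ i ∈ pre, PySem.Set.contains m i = true := by
    by_cases hc : queues.contains key = true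
    · rw [PySem.Dict.contains_eq_isSome_get?, Option.isSome_iff_exists] at hc
      obtain ⟨cur0, hg⟩ := hc
      have : cur = cur0 := by
        rw [hcur, hq', if_pos, PySem.Dict.getD_eq_get?_getD, hg]; rfl
        rw [PySem.Dict.contains_eq_isSome_get?, hg]; rfl
      rw [this]
      exact hinv key cur0 hg
    · refine ⟨[], ?_, by simp⟩
      have : cur = pvQueue preds key := by
        rw [hcur, hq', if_neg (by simp [hc]), PySem.Dict.getD_eq_get?_getD,
          PySem.Dict.get?_insert_self]; rfl
      simp [this]
  obtain ⟨pre, hpre, hprem⟩ := hsuffix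
  -- A's inner search = head of the lazily cleaned queue
  have hfind : pvFindA g (PySem.List.enumerate preds) m
      = (cur.dropWhile (fun i => PySem.Set.contains m i)).head? := by
    rw [pvFindA_eq_find]
    have hfilter : (PySem.List.enumerate preds).filter (fun ip => pvMatchA g ip.2)
        = (PySem.List.enumerate preds).filter
            (fun ip => (ks.zip (pvSig ks g)).all (fun kv => pvNorm (ip.2.getD kv.1 "") == kv.2)) :=
      List.filter_congr (fun ip _ => by rw [pvMatchA_eq_sig, ← pvZipAllEq])
    have hqueue : ((PySem.List.enumerate preds).filter
        (fun ip => (ks.zip (pvSig ks g)).all (fun kv => pvNorm (ip.2.getD kv.1 "") == kv.2))).map (·.1)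
        = pvQueue preds key := rfl
    rw [hfilter, hqueue, hpre, List.find?_append]
    have : List.find? (fun i => ! PySem.Set.contains m i) pre = none := by
      rw [List.find?_eq_none]
      intro x hx
      have := hprem x hx
      simp [PySem.Set.contains] at this
      simp [this]
    rw [this, Option.none_or, find_not_eq_head_dropWhile]
  -- reduce both steps
  have hBdef : pvStepB preds (queues, m, tp) g
      = match cur.dropWhile (fun i => PySem.Set.contains m i) with
        | [] => (queues'.insert key (cur.dropWhile (fun i => PySem.Set.contains m i)), m, tp)
        | i :: rest => (queues'.insert key rest, PySem.Set.add m i, tp + 1) := by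
    rw [pvStepB]
    rfl
  have hcurdec : cur = cur.takeWhile (fun i => PySem.Set.contains m i)
      ++ cur.dropWhile (fun i => PySem.Set.contains m i) :=
    (List.takeWhile_append_dropWhile).symm
  rcases hdw : cur.dropWhile (fun i => PySem.Set.contains m i) with _ | ⟨i, rest⟩
  · -- no available match
    rw [hBdef, hdw]
    constructor
    · simp only [pvStepA, hfind, hdw]
      rfl
    · intro key' cur' hget
      by_cases hkk : key' = key
      · subst hkk
        rw [PySem.Dict.get?_insert_self] at hget
        have hc' : ([] : List Int) = cur' := by injection hget
        subst hc'
        refine ⟨pre ++ cur.takeWhile (fun i => PySem.Set.contains m i), ?_, ?_⟩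
        · rw [hpre]
          conv_lhs => rw [hcurdec]
          rw [hdw]
          simp
        · intro j hj
          rcases List.mem_append.mp hj with h | h
          · exact hprem j h
          · exact List.mem_takeWhile_imp h
      · rw [PySem.Dict.get?_insert_of_ne _ _ hkk] at hget
        rw [hq'] at hget
        split at hget
        · exact hinv key' cur' hget
        · rw [PySem.Dict.get?_insert_of_ne _ _ hkk] at hget
          exact hinv key' cur' hget
  · -- match found: index i
    rw [hBdef, hdw]
    constructor
    · simp only [pvStepA, hfind, hdw]
      rfl
    · intro key' cur' hget
      by_cases hkk : key' = key
      · subst hkk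
        rw [PySem.Dict.get?_insert_self] at hget
        have hc' : rest = cur' := by injection hget
        subst hc'
        refine ⟨pre ++ cur.takeWhile (fun i => PySem.Set.contains m i) ++ [i], ?_, ?_⟩
        · rw [hpre]
          conv_lhs => rw [hcurdec]
          rw [hdw]
          simp [List.append_assoc]
        · intro j hj
          rcases List.mem_append.mp hj with h | h
          · rcases List.mem_append.mp h with h' | h'
            · exact pvContainsAddMono m i j (hprem j h')
            · exact pvContainsAddMono m i j (List.mem_takeWhile_imp h')
          · rw [List.mem_singleton] at h
            rw [h]
            exact pvContainsAddSelf m i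
      · rw [PySem.Dict.get?_insert_of_ne _ _ hkk] at hget
        rw [hq'] at hget
        split at hget
        · obtain ⟨pre', h1, h2⟩ := hinv key' cur' hget
          exact ⟨pre', h1, fun j hj => pvContainsAddMono m i j (h2 j hj)⟩
        · rw [PySem.Dict.get?_insert_of_ne _ _ hkk] at hget
          obtain ⟨pre', h1, h2⟩ := hinv key' cur' hget
          exact ⟨pre', h1, fun j hj => pvContainsAddMono m i j (h2 j hj)⟩

theorem pvLoop_agree (gs preds : List (PySem.Dict String String))
    (queues : PySem.Dict (List String × List String) (List Int))
    (m : PySem.Set Int) (tp : Int) (hinv : pvInv queues preds m) :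
    gs.foldl (pvStepA (PySem.List.enumerate preds)) (m, tp)
      = ((gs.foldl (pvStepB preds) (queues, m, tp)).2.1,
         (gs.foldl (pvStepB preds) (queues, m, tp)).2.2) := by
  induction gs generalizing queues m tp with
  | nil => rfl
  | cons g rest ih =>
    obtain ⟨hstep, hinv'⟩ := pvStep_agree preds g queues m tp hinv
    simp only [List.foldl_cons, hstep]
    exact ih (pvStepB preds (queues, m, tp) g).1 (pvStepB preds (queues, m, tp) g).2.1
      (pvStepB preds (queues, m, tp) g).2.2 hinv'

theorem pvInv_empty (preds : List (PySem.Dict String String)) :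
    pvInv PySem.Dict.empty preds PySem.Set.empty := by
  intro key cur h
  simp [PySem.Dict.get?_empty] at h

-- ===== VERDICT (by name: the statement is the Claim_ definition above) =====
theorem compare_list_of_objects_spec : Claim_equal_compare_list_of_objects := by
  intro gt_list pred_list _
  unfold Spec_compare_list_of_objects compare_list_of_objects compare_list_of_objects_alt
  simp only []
  rw [pvLoop_agree _ _ _ _ _ (pvInv_empty _)]
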